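-- pv_equiv track=rewrite | github.com/david123bob/codingChallenge | sas_parser.py | _text_segments
-- ===== SOURCE A (Python) =====
-- def _text_segments(line: str) -> list[tuple[int, int, str]]:
--     """Return list of (start, end, text) for each contiguous non-space run."""
--     segments = []
--     start = None
--     for i, ch in enumerate(line):
--         if ch != ' ':
--             if start is None:
--                 start = i
--         else:
--             if start is not None:
--                 segments.append((start, i - 1, line[start:i]))
--                 start = None
--     if start is not None:
--         segments.append((start, len(line) - 1, line[start:]))
--     return segments
-- ===== SOURCE B (Python) =====
-- import re
--
-- def _text_segments(line: str) -> list[tuple[int, int, str]]: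
--     """Return list of (start, end, text) for each contiguous non-space run."""
--     return [(m.start(), m.end() - 1, m.group())
--             for m in re.finditer(r'[^ ]+', line)]
-- ===== Notes on version B (the rewrite author's own statement) =====
-- stated objective: idiomatic
-- what changed: Replaces the manual per-character index/sentinel (start=None) state machine with a single re.finditer(r'[^ ]+') pass whose matches yield each non-space run with its positions directly; the scan runs inside the regex engine instead of a Python-level loop.
import Mathlib
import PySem

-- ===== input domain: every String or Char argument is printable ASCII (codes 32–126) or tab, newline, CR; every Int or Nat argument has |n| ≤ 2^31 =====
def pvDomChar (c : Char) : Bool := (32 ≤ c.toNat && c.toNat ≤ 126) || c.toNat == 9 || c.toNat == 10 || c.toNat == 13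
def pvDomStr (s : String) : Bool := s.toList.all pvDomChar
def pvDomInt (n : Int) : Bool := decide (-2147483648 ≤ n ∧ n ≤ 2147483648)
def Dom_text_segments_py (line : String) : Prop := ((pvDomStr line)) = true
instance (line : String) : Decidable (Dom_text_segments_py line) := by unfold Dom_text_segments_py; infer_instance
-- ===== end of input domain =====

-- B replaces A's index/sentinel state machine with a regex-style scan that yields
-- whole maximal non-space runs directly (idiomatic; same O(n) cost).


-- ===== PORT A =====
-- loop body: 'if ch != " ": if start is None: start = i  else: if start is not None: append((start, i-1, line[start:i])); start = None'
def aStep (cs : List Char) (st : List (Int × Int × String) × Option Int) (p : Int × Char) :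
    List (Int × Int × String) × Option Int :=
  if p.2 ≠ ' ' then
    match st.2 with
    | none => (st.1, some p.1)
    | some _ => st
  else
    match st.2 with
    | some s => (st.1 ++ [(s, p.1 - 1, String.ofList (PySem.List.slice cs (some s) (some p.1)))], none)
    | none => st

-- trailing 'if start is not None: append((start, len(line)-1, line[start:]))'
def aFinish (cs : List Char) (r : List (Int × Int × String) × Option Int) :
    List (Int × Int × String) :=
  match r.2 with
  | some s => r.1 ++ [(s, (cs.length : Int) - 1, String.ofList (PySem.List.slice cs (some s) none))]
  | none => r.1

def text_segments_py (line : String) : List (Int × Int × String) :=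
  aFinish line.toList ((PySem.List.enumerate line.toList 0).foldl (aStep line.toList) ([], none))

-- ===== PORT B =====
-- port of re.finditer(r'[^ ]+', line): emit each maximal non-space run with its positions
def altRuns (cs : List Char) (i : Nat) : List (Int × Int × String) :=
  match cs with
  | [] => []
  | c :: rest =>
    if c = ' ' then altRuns rest (i + 1)
    else
      let run := (c :: rest).takeWhile (· ≠ ' ')
      ((i : Int), (i : Int) + run.length - 1, String.ofList run) ::
        altRuns ((c :: rest).dropWhile (· ≠ ' ')) (i + run.length)
termination_by cs.length
decreasing_by
  · simp
  · simp only [List.dropWhile_cons, List.length_cons]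
    split
    · exact Nat.lt_succ_of_le (List.length_dropWhile_le _ _)
    · simp_all

def text_segments_py_alt (line : String) : List (Int × Int × String) :=
  altRuns line.toList 0

-- ===== PRECONDITION & SPEC =====
def Spec_text_segments_py (line : String) (out : List (Int × Int × String)) : Prop := out = text_segments_py_alt line
instance (line : String) (out : List (Int × Int × String)) : Decidable (Spec_text_segments_py line out) := by unfold Spec_text_segments_py; infer_instance

-- ===== CLAIM (what is proved, stated in full; the proofs are below) =====
def Claim_equal_text_segments_py : Prop := ∀ (line : String), Dom_text_segments_py line → Spec_text_segments_py line (text_segments_py line)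

-- ===== LEMMAS AND PROOFS =====

lemma pv_tw (l : List Char) (h : ∀ c ∈ l, c ≠ ' ') :
    List.takeWhile (fun x => decide (x ≠ ' ')) l = l := by
  simp only [List.takeWhile_eq_self_iff]
  intro x hx
  simpa using h x hx

lemma pv_dw (l : List Char) (h : ∀ c ∈ l, c ≠ ' ') :
    List.dropWhile (fun x => decide (x ≠ ' ')) l = [] := by
  simp only [List.dropWhile_eq_nil_iff]
  intro x hx
  simpa using h x hx

lemma altRuns_nil (i : Nat) : altRuns [] i = [] := by
  rw [altRuns.eq_def]

lemma altRuns_cons_space (rest : List Char) (i : Nat) :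
    altRuns (' ' :: rest) i = altRuns rest (i + 1) := by
  rw [altRuns.eq_def]; simp

lemma altRuns_cons_ns (c : Char) (rest : List Char) (i : Nat) (hc : c ≠ ' ') :
    altRuns (c :: rest) i =
      ((i : Int), (i : Int) + ((c :: rest).takeWhile (fun x => decide (x ≠ ' '))).length - 1,
        String.ofList ((c :: rest).takeWhile (fun x => decide (x ≠ ' ')))) ::
        altRuns ((c :: rest).dropWhile (fun x => decide (x ≠ ' ')))
          (i + ((c :: rest).takeWhile (fun x => decide (x ≠ ' '))).length) := by
  rw [altRuns.eq_def]; simp [hc]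

theorem loop_spec (rest : List Char) :
    (∀ (pre : List Char) (segs : List (Int × Int × String)),
      aFinish (pre ++ rest)
          ((PySem.List.enumerate rest (pre.length : Int)).foldl (aStep (pre ++ rest)) (segs, none))
        = segs ++ altRuns rest pre.length)
    ∧ (∀ (pre run : List Char) (segs : List (Int × Int × String)),
        run ≠ [] → (∀ c ∈ run, c ≠ ' ') →
      aFinish (pre ++ run ++ rest)
          ((PySem.List.enumerate rest ((pre.length + run.length : Nat) : Int)).foldl
            (aStep (pre ++ run ++ rest)) (segs, some (pre.length : Int)))
        = segs ++ altRuns (run ++ rest) pre.length) := by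
  induction rest with
  | nil =>
    constructor
    · intro pre segs
      simp [aFinish, altRuns_nil, PySem.List.enumerate_nil]
    · intro pre run segs hne hns
      obtain ⟨d, run', hdrun⟩ := List.exists_cons_of_ne_nil hne
      have hdns : d ≠ ' ' := hns d (by simp [hdrun])
      simp only [PySem.List.enumerate_nil, List.foldl_nil, aFinish, List.append_nil]
      rw [PySem.List.slice_from_natCast, List.drop_left]
      conv_rhs => rw [hdrun]
      rw [altRuns_cons_ns d run' pre.length hdns]
      rw [show d :: run' = run from hdrun.symm]
      rw [pv_tw run hns, pv_dw run hns, altRuns_nil]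
      simp
  | cons c rest ih =>
    constructor
    · intro pre segs
      rw [PySem.List.enumerate_cons, List.foldl_cons]
      by_cases hc : c = ' '
      · subst hc
        simp only [aStep, ne_eq, not_true_eq_false, if_false]
        rw [altRuns_cons_space]
        have heq : pre ++ ' ' :: rest = (pre ++ [' ']) ++ rest := by simp
        have hstart : (pre.length : Int) + 1 = (((pre ++ [' ']).length : Nat) : Int) := by simp
        rw [heq, hstart, ih.1 (pre ++ [' ']) segs]
        simp
      · simp only [aStep, ne_eq, hc, not_false_eq_true, if_true]
        have heq : pre ++ c :: rest = pre ++ [c] ++ rest := by simp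
        have hstart : (pre.length : Int) + 1 = ((pre.length + ([c] : List Char).length : Nat) : Int) := by
          simp
        rw [heq, hstart, ih.2 pre [c] segs (by simp) (by simpa using hc)]
        simp
    · intro pre run segs hne hns
      obtain ⟨d, run', hdrun⟩ := List.exists_cons_of_ne_nil hne
      have hdns : d ≠ ' ' := hns d (by simp [hdrun])
      rw [PySem.List.enumerate_cons, List.foldl_cons]
      by_cases hc : c = ' '
      · subst hc
        simp only [aStep, ne_eq, not_true_eq_false, if_false]
        have hslice : PySem.List.slice (pre ++ run ++ ' ' :: rest) (some (pre.length : Int))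
            (some ((pre.length + run.length : Nat) : Int)) = run := by
          rw [PySem.List.slice_natCast, List.append_assoc, List.drop_left]
          rw [show pre.length + run.length - pre.length = run.length from by omega]
          exact List.take_left
        have heq : pre ++ run ++ ' ' :: rest = (pre ++ run ++ [' ']) ++ rest := by simp
        have hstart : ((pre.length + run.length : Nat) : Int) + 1
            = (((pre ++ run ++ [' ']).length : Nat) : Int) := by push_cast; simp; ring
        rw [hslice, heq, hstart, ih.1 (pre ++ run ++ [' '])
          (segs ++ [((pre.length : Int), ((pre.length + run.length : Nat) : Int) - 1, String.ofList run)])]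
        conv_rhs => rw [hdrun, List.cons_append]
        rw [altRuns_cons_ns d (run' ++ ' ' :: rest) pre.length hdns,
          show d :: (run' ++ ' ' :: rest) = run ++ ' ' :: rest from by simp [hdrun]]
        have htw2 : (run ++ ' ' :: rest).takeWhile (fun x => decide (x ≠ ' ')) = run := by
          rw [List.takeWhile_append, pv_tw run hns]
          simp
        have hdw2 : (run ++ ' ' :: rest).dropWhile (fun x => decide (x ≠ ' ')) = ' ' :: rest := by
          rw [List.dropWhile_append, pv_dw run hns]
          simp
        rw [htw2, hdw2, altRuns_cons_space]
        simp
        congr 1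
      · simp only [aStep, ne_eq, hc, not_false_eq_true, if_true]
        have heq : pre ++ run ++ c :: rest = pre ++ (run ++ [c]) ++ rest := by simp
        have hstart : ((pre.length + run.length : Nat) : Int) + 1
            = ((pre.length + (run ++ [c]).length : Nat) : Int) := by push_cast; simp; ring
        have hns' : ∀ x ∈ run ++ [c], x ≠ ' ' := by
          intro x hx
          rcases List.mem_append.1 hx with h | h
          · exact hns x h
          · simp at h; subst h; exact hc
        rw [heq, hstart, ih.2 pre (run ++ [c]) segs (by simp) hns']
        simp

theorem text_segments_py_spec' (line : String) :
    text_segments_py line = text_segments_py_alt line := by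
  have h := (loop_spec line.toList).1 [] []
  simpa [text_segments_py, text_segments_py_alt] using h

-- ===== VERDICT (by name: the statement is the Claim_ definition above) =====
theorem text_segments_py_spec : Claim_equal_text_segments_py := by
  intro line _
  unfold Spec_text_segments_py
  exact text_segments_py_spec' line
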